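-- pv_equiv track=rewrite | github.com/Alfonso00MA/MrMilu-Codility-test | task2.py | solution
-- ===== SOURCE A (Python) =====
-- def solution(A,P,B,E):
--     """
--     Give two arrays of integers, and two integers B, E the function returns True if:
--     a package can be moved from B to E using cranes described by the two arrays.
--     False otherwise
--     """
--     ranges = []
--     for i,j in zip(A,P):
--         ranges.append([j-i, j+i])
--
--     merged_ranges = merge_ranges(ranges)
--
--     if B > E:
--         B, E = E, B
--
--     for merged_range in merged_ranges:
--         if (merged_range[0] <= B <= merged_range[1]) and (merged_range[0] <= E <= merged_range[1]):
--             return True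
--
--     return False
--
-- def merge_ranges(ranges):
--     """
--     Given a list of intervals it returns the merged version of them: the result has only mutually exclusive intervals
--     """
--     ranges.sort(key = lambda x:x[0])
--     merged_ranges = [ranges[0]]
--     for range_loop in ranges[1:]:
--         if merged_ranges[-1][1] >= range_loop[0]:
--             # If upper bound of the last merged_range is higher than low bound of the range in the loop,
--             # override upper bound of last merged range with max of previous value and upper bound of range in loop
--             merged_ranges[-1][1] = max(merged_ranges[-1][1], range_loop[1])
--         else:
--             merged_ranges.append(range_loop)
--     return merged_ranges
-- ===== SOURCE B (Python) =====
-- def solution(A, P, B, E):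
--     # Reachability fixpoint over the crane intervals: no sorting, no merged list.
--     # B,E lie in one merged interval iff B is covered and the rightmost point
--     # reachable from B through overlapping/touching intervals is >= E.
--     if B > E:
--         B, E = E, B
--     iv = [(p - a, p + a) for a, p in zip(A, P)]
--     if not any(s <= B <= e for s, e in iv):
--         return False
--     cur = B
--     changed = True
--     while changed and cur < E:
--         changed = False
--         for s, e in iv:
--             if s <= cur < e:
--                 cur = e
--                 changed = True
--     return cur >= E
-- ===== Notes on version B (the rewrite author's own statement) =====
-- stated objective: faster
-- what changed: Replaces sort-then-merge-then-scan by an unsorted reachability fixpoint: after swapping so B<=E, B checks that B is covered by some crane interval and then repeatedly extends the farthest reachable point cur to the right end of any interval containing cur, answering whether cur reaches E; no sorting and no merged-interval list exist in B, and the sweep exits as soon as cur >= E.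
import Mathlib
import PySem

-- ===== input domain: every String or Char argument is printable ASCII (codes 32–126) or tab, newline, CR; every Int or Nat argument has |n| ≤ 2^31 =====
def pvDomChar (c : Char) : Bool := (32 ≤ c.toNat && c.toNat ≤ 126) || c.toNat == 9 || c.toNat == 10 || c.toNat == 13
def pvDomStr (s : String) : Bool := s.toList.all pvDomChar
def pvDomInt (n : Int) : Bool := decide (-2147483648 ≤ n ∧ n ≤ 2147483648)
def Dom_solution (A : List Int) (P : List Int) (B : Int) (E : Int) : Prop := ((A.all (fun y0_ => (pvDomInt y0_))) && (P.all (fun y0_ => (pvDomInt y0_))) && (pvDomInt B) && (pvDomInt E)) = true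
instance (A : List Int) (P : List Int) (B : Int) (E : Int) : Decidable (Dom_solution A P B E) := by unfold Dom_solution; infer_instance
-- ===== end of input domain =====

-- B replaces A's sort-then-merge-then-scan by an unsorted reachability fixpoint
-- (extend the farthest reachable point through intervals containing it);
-- same return value wherever A returns (A raises IndexError on empty A or P).

-- ===== PORT A =====
-- merge_ranges loop: state = (already-completed merged intervals, last merged interval)
def pvMergeStep (st : List (Int × Int) × (Int × Int)) (r : Int × Int) :
    List (Int × Int) × (Int × Int) :=
  if st.2.2 ≥ r.1 then (st.1, (st.2.1, max st.2.2 r.2))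
  else (st.1 ++ [st.2], r)

def solution (A : List Int) (P : List Int) (B : Int) (E : Int) : Bool :=
  let ranges := (List.zip A P).map (fun ij => (ij.2 - ij.1, ij.2 + ij.1))
  let srt := PySem.List.sorted ranges (fun x => x.1)
  match srt with
  | [] => false  -- Python: merge_ranges indexes ranges[0] → IndexError; excluded by Pre_solution
  | r0 :: rest =>
    let st := rest.foldl pvMergeStep ([], r0)
    let merged := st.1 ++ [st.2]
    let B' := if B > E then E else B
    let E' := if B > E then B else E
    merged.any (fun m =>
      (decide (m.1 ≤ B') && decide (B' ≤ m.2)) && (decide (m.1 ≤ E') && decide (E' ≤ m.2)))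

-- ===== PORT B =====
-- inner 'for s, e in iv' pass: state = (cur, changed)
def pvPassStep (st : Int × Bool) (r : Int × Int) : Int × Bool :=
  if r.1 ≤ st.1 ∧ st.1 < r.2 then (r.2, true) else st

-- termination facts for the while-loop port (cited by decreasing_by)
lemma pvPass_inv (iv : List (Int × Int)) : ∀ (c : Int) (b : Bool),
    ((iv.foldl pvPassStep (c, b)).1 = c ∧ (iv.foldl pvPassStep (c, b)).2 = b) ∨
    (c < (iv.foldl pvPassStep (c, b)).1 ∧ (iv.foldl pvPassStep (c, b)).2 = true ∧
      ∃ r ∈ iv, r.2 = (iv.foldl pvPassStep (c, b)).1) := by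
  induction iv with
  | nil => intro c b; exact Or.inl ⟨rfl, rfl⟩
  | cons r iv ih =>
    intro c b
    simp only [List.foldl_cons, pvPassStep]
    by_cases h : r.1 ≤ c ∧ c < r.2
    · rw [if_pos h]
      rcases ih r.2 true with ⟨h1, h2⟩ | ⟨h1, h2, s, hs, hse⟩
      · exact Or.inr ⟨by omega, h2, r, List.mem_cons_self, h1.symm⟩
      · exact Or.inr ⟨by omega, h2, s, List.mem_cons_of_mem _ hs, hse⟩
    · rw [if_neg h]
      rcases ih c b with ⟨h1, h2⟩ | ⟨h1, h2, s, hs, hse⟩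
      · exact Or.inl ⟨h1, h2⟩
      · exact Or.inr ⟨h1, h2, s, List.mem_cons_of_mem _ hs, hse⟩

lemma pv_filter_mono (c c' : Int) (h : c ≤ c') : ∀ (iv : List (Int × Int)),
    (iv.filter (fun r => decide (c' < r.2))).length ≤
    (iv.filter (fun r => decide (c < r.2))).length := by
  intro iv
  induction iv with
  | nil => simp
  | cons r iv ih =>
    simp only [List.filter_cons]
    by_cases h2 : c' < r.2
    · rw [if_pos (by simpa using h2), if_pos (by simp; omega)]
      simpa using ih
    · rw [if_neg (by simpa using h2)]
      by_cases h3 : c < r.2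
      · rw [if_pos (by simpa using h3)]; simp; omega
      · rw [if_neg (by simpa using h3)]; exact ih

lemma pv_filter_decrease (c c' : Int) (h : c < c') : ∀ (iv : List (Int × Int)),
    (∃ r ∈ iv, r.2 = c') →
    (iv.filter (fun r => decide (c' < r.2))).length <
    (iv.filter (fun r => decide (c < r.2))).length := by
  intro iv
  induction iv with
  | nil => rintro ⟨r, hr, -⟩; simp at hr
  | cons r iv ih =>
    rintro ⟨s, hs, hse⟩
    simp only [List.filter_cons]
    rcases List.mem_cons.mp hs with rfl | hs'
    · rw [if_neg (by simp; omega), if_pos (by simp; omega)]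
      have := pv_filter_mono c c' (le_of_lt h) iv
      simp; omega
    · have := ih ⟨s, hs', hse⟩
      by_cases h2 : c' < r.2
      · rw [if_pos (by simpa using h2), if_pos (by simp; omega)]
        simpa using this
      · rw [if_neg (by simpa using h2)]
        by_cases h3 : c < r.2
        · rw [if_pos (by simpa using h3)]; simp; omega
        · rw [if_neg (by simpa using h3)]; exact this

-- 'while changed and cur < E' loop (changed is True on entry)
def pvLoopB (iv : List (Int × Int)) (E' : Int) (cur : Int) : Int :=
  if E' ≤ cur then cur
  else
    let st := iv.foldl pvPassStep (cur, false)
    if h : st.2 = true then pvLoopB iv E' st.1 else st.1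
termination_by (iv.filter (fun r => decide (cur < r.2))).length
decreasing_by
  simp only [List.foldl_attach]
  simp only [st, List.foldl_attach] at h
  rcases pvPass_inv iv cur false with ⟨-, h2⟩ | ⟨h1, -, hex⟩
  · rw [h] at h2; cases h2
  · exact pv_filter_decrease cur _ h1 iv hex

def solution_alt (A : List Int) (P : List Int) (B : Int) (E : Int) : Bool :=
  let B' := if B > E then E else B
  let E' := if B > E then B else E
  let iv := (List.zip A P).map (fun ij => (ij.2 - ij.1, ij.2 + ij.1))
  if iv.any (fun r => decide (r.1 ≤ B') && decide (B' ≤ r.2)) then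
    decide (E' ≤ pvLoopB iv E' B')
  else false

-- ===== PRECONDITION & SPEC =====
-- Python A raises IndexError (merge_ranges reads ranges[0]) when zip(A,P) is empty, i.e. A or P empty.
def Pre_solution (A : List Int) (P : List Int) (B : Int) (E : Int) : Prop :=
  A ≠ [] ∧ P ≠ []
instance (A : List Int) (P : List Int) (B : Int) (E : Int) : Decidable (Pre_solution A P B E) := by
  unfold Pre_solution; infer_instance

def pvWitness_solution : List Int × List Int × Int × Int := ([1, 2], [0, 5], 0, 4)

def Spec_solution (A : List Int) (P : List Int) (B : Int) (E : Int) (out : Bool) : Prop :=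
  out = solution_alt A P B E
instance (A : List Int) (P : List Int) (B : Int) (E : Int) (out : Bool) :
    Decidable (Spec_solution A P B E out) := by unfold Spec_solution; infer_instance

-- ===== CLAIM =====
def Claim_equal_solution : Prop := ∀ (A : List Int) (P : List Int) (B : Int) (E : Int),
  Dom_solution A P B E → Pre_solution A P B E → Spec_solution A P B E (solution A P B E)

-- ===== LEMMAS AND PROOFS =====

-- m "covers" w.r.t. the interval list L: every unit step inside m is crossed by some r ∈ L,
-- and (if m is not inverted) m's right end lies inside some r ∈ L.
def pvCovers (L : List (Int × Int)) (m : Int × Int) : Prop :=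
  (∀ x : Int, m.1 ≤ x → x < m.2 → ∃ r ∈ L, r.1 ≤ x ∧ x < r.2) ∧
  (m.1 ≤ m.2 → ∃ r ∈ L, r.1 ≤ m.2 ∧ m.2 ≤ r.2)

lemma pv_pairwise_total {α : Type} (R : α → α → Prop) :
    ∀ (l : List α), l.Pairwise R → ∀ a ∈ l, ∀ b ∈ l, a = b ∨ R a b ∨ R b a := by
  intro l hl
  induction hl with
  | nil => intro a ha; simp at ha
  | cons hhd _ ih =>
    intro a ha b hb
    rcases List.mem_cons.mp ha with rfl | ha' <;> rcases List.mem_cons.mp hb with rfl | hb'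
    · exact Or.inl rfl
    · exact Or.inr (Or.inl (hhd _ hb'))
    · exact Or.inr (Or.inr (hhd _ ha'))
    · exact ih a ha' b hb'

lemma pv_merge_master (L : List (Int × Int)) :
    ∀ (rest : List (Int × Int)) (done : List (Int × Int)) (cur : Int × Int),
    rest.Pairwise (fun a b => a.1 ≤ b.1) →
    (∀ r ∈ rest, cur.1 ≤ r.1) →
    (∀ r ∈ rest, r ∈ L) →
    List.Pairwise (fun m m' => m.2 < m'.1) (done ++ [cur]) →
    (∀ m ∈ done ++ [cur], pvCovers L m) →
    (List.Pairwise (fun m m' => m.2 < m'.1)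
        ((rest.foldl pvMergeStep (done, cur)).1 ++ [(rest.foldl pvMergeStep (done, cur)).2]) ∧
     (∀ m ∈ (rest.foldl pvMergeStep (done, cur)).1 ++ [(rest.foldl pvMergeStep (done, cur)).2],
        pvCovers L m) ∧
     (∀ p : Int × Int, (∃ m ∈ done ++ [cur], m.1 ≤ p.1 ∧ p.2 ≤ m.2) →
        ∃ m ∈ (rest.foldl pvMergeStep (done, cur)).1 ++ [(rest.foldl pvMergeStep (done, cur)).2],
          m.1 ≤ p.1 ∧ p.2 ≤ m.2) ∧
     (∀ r ∈ rest,
        ∃ m ∈ (rest.foldl pvMergeStep (done, cur)).1 ++ [(rest.foldl pvMergeStep (done, cur)).2],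
          m.1 ≤ r.1 ∧ r.2 ≤ m.2)) := by
  intro rest
  induction rest with
  | nil =>
    intro done cur hpw hlo hmem hsep hcov
    exact ⟨hsep, hcov, fun p hp => hp, by intro r hr; simp at hr⟩
  | cons r rest ih =>
    intro done cur hpw hlo hmem hsep hcov
    obtain ⟨hhd, hpw'⟩ := List.pairwise_cons.mp hpw
    have hrL : r ∈ L := hmem r List.mem_cons_self
    have hlo_r : cur.1 ≤ r.1 := hlo r List.mem_cons_self
    rw [List.pairwise_append] at hsep
    obtain ⟨hsd, -, hdc⟩ := hsep
    simp only [List.foldl_cons, pvMergeStep]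
    by_cases hc : cur.2 ≥ r.1
    · rw [if_pos hc]
      have hsep' : List.Pairwise (fun m m' => m.2 < m'.1) (done ++ [(cur.1, max cur.2 r.2)]) := by
        rw [List.pairwise_append]
        exact ⟨hsd, List.pairwise_singleton _ _,
          fun a ha b hb => by simp at hb; subst hb; exact hdc a ha cur (by simp)⟩
      have hcov' : ∀ m ∈ done ++ [(cur.1, max cur.2 r.2)], pvCovers L m := by
        intro m hm
        rcases List.mem_append.mp hm with hm' | hm'
        · exact hcov m (List.mem_append_left _ hm')
        · simp at hm'; subst hm'
          have hcc := hcov cur (List.mem_append_right _ (by simp))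
          constructor
          · intro x hx1 hx2
            simp only at hx1 hx2 ⊢
            by_cases hx : x < cur.2
            · exact hcc.1 x hx1 hx
            · exact ⟨r, hrL, by omega, by omega⟩
          · intro hle
            simp only at hle ⊢
            by_cases hr2 : r.2 ≤ cur.2
            · have hmx : max cur.2 r.2 = cur.2 := by omega
              rw [hmx]
              exact hcc.2 (by omega)
            · have hmx : max cur.2 r.2 = r.2 := by omega
              rw [hmx]
              exact ⟨r, hrL, by omega, le_rfl⟩
      obtain ⟨g1, g2, g3, g4⟩ := ih done (cur.1, max cur.2 r.2) hpw'
        (fun r' hr' => hlo r' (List.mem_cons_of_mem _ hr'))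
        (fun r' hr' => hmem r' (List.mem_cons_of_mem _ hr')) hsep' hcov'
      refine ⟨g1, g2, ?_, ?_⟩
      · rintro p ⟨m, hm, hp1, hp2⟩
        rcases List.mem_append.mp hm with hm' | hm'
        · exact g3 p ⟨m, List.mem_append_left _ hm', hp1, hp2⟩
        · simp at hm'
          rw [hm'] at hp1 hp2
          exact g3 p ⟨(cur.1, max cur.2 r.2), List.mem_append_right _ (by simp), hp1, by simp; omega⟩
      · intro r' hr'
        rcases List.mem_cons.mp hr' with rfl | hr''
        · exact g3 r' ⟨(cur.1, max cur.2 r'.2), List.mem_append_right _ (by simp), hlo_r, by simp⟩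
        · exact g4 r' hr''
    · rw [if_neg hc]
      have hsep' : List.Pairwise (fun m m' => m.2 < m'.1) ((done ++ [cur]) ++ [r]) := by
        rw [List.pairwise_append]
        refine ⟨by rw [List.pairwise_append]; exact ⟨hsd, List.pairwise_singleton _ _, hdc⟩,
          List.pairwise_singleton _ _, ?_⟩
        intro a ha b hb
        simp at hb; subst hb
        rcases List.mem_append.mp ha with ha' | ha'
        · have := hdc a ha' cur (by simp)
          omega
        · simp at ha'
          rw [ha']
          omega
      have hcov' : ∀ m ∈ (done ++ [cur]) ++ [r], pvCovers L m := by
        intro m hm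
        rcases List.mem_append.mp hm with hm' | hm'
        · exact hcov m hm'
        · simp at hm'
          rw [hm']
          exact ⟨fun x h1 h2 => ⟨r, hrL, h1, h2⟩, fun hle => ⟨r, hrL, hle, le_rfl⟩⟩
      obtain ⟨g1, g2, g3, g4⟩ := ih (done ++ [cur]) r hpw' hhd
        (fun r' hr' => hmem r' (List.mem_cons_of_mem _ hr')) hsep' hcov'
      refine ⟨g1, g2, ?_, ?_⟩
      · rintro p ⟨m, hm, hp1, hp2⟩
        exact g3 p ⟨m, List.mem_append_left _ hm, hp1, hp2⟩
      · intro r' hr'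
        rcases List.mem_cons.mp hr' with rfl | hr''
        · exact g3 r' ⟨r', List.mem_append_right _ (by simp), le_rfl, le_rfl⟩
        · exact g4 r' hr''

lemma pvPass_mono (iv : List (Int × Int)) (c : Int) (b : Bool) :
    c ≤ (iv.foldl pvPassStep (c, b)).1 := by
  rcases pvPass_inv iv c b with ⟨h, -⟩ | ⟨h, -, -⟩ <;> omega

lemma pvPass_cross (iv : List (Int × Int)) : ∀ (c : Int) (b : Bool) (r : Int × Int),
    r ∈ iv → r.1 ≤ c → c < r.2 → c < (iv.foldl pvPassStep (c, b)).1 := by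
  induction iv with
  | nil => intro c b r hr; simp at hr
  | cons s iv ih =>
    intro c b r hr h1 h2
    simp only [List.foldl_cons, pvPassStep]
    rcases List.mem_cons.mp hr with rfl | hr'
    · rw [if_pos ⟨h1, h2⟩]
      have := pvPass_mono iv r.2 true
      omega
    · by_cases hs : s.1 ≤ c ∧ c < s.2
      · rw [if_pos hs]
        have := pvPass_mono iv s.2 true
        omega
      · rw [if_neg hs]
        exact ih c b r hr' h1 h2

lemma pvPass_upper (M iv : List (Int × Int))
    (hsep : List.Pairwise (fun m m' => m.2 < m'.1) M)
    (hcont : ∀ r ∈ iv, ∃ m' ∈ M, m'.1 ≤ r.1 ∧ r.2 ≤ m'.2)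
    (m : Int × Int) (hm : m ∈ M) : ∀ (c : Int) (b : Bool), m.1 ≤ c → c ≤ m.2 →
    m.1 ≤ (iv.foldl pvPassStep (c, b)).1 ∧ (iv.foldl pvPassStep (c, b)).1 ≤ m.2 := by
  induction iv with
  | nil => intro c b h1 h2; exact ⟨h1, h2⟩
  | cons r iv ih =>
    intro c b h1 h2
    have hcont' : ∀ r' ∈ iv, ∃ m' ∈ M, m'.1 ≤ r'.1 ∧ r'.2 ≤ m'.2 :=
      fun r' hr' => hcont r' (List.mem_cons_of_mem _ hr')
    simp only [List.foldl_cons, pvPassStep]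
    by_cases hs : r.1 ≤ c ∧ c < r.2
    · rw [if_pos hs]
      obtain ⟨mr, hmr, hmr1, hmr2⟩ := hcont r List.mem_cons_self
      rcases pv_pairwise_total _ M hsep m hm mr hmr with rfl | hlt | hlt
      · exact ih hcont' r.2 true (by omega) (by omega)
      · omega
      · omega
    · rw [if_neg hs]
      exact ih hcont' c b h1 h2

lemma pvLoop_lower (iv : List (Int × Int)) (E' : Int) :
    ∀ (n : Nat) (cur : Int), (iv.filter (fun r => decide (cur < r.2))).length ≤ n →
    (∀ x : Int, cur ≤ x → x < E' → ∃ r ∈ iv, r.1 ≤ x ∧ x < r.2) →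
    E' ≤ pvLoopB iv E' cur := by
  intro n
  induction n with
  | zero =>
    intro cur hlen hcr
    rw [pvLoopB]
    split_ifs with hE hst
    · exact hE
    all_goals
      exfalso
      obtain ⟨r, hr, hr1, hr2⟩ := hcr cur le_rfl (by omega)
      have : r ∈ iv.filter (fun r => decide (cur < r.2)) :=
        List.mem_filter.mpr ⟨hr, by simpa using hr2⟩
      have := List.length_pos_of_mem this
      omega
  | succ n ih =>
    intro cur hlen hcr
    rw [pvLoopB]
    split_ifs with hE
    · exact hE
    rcases pvPass_inv iv cur false with ⟨heq, hb⟩ | ⟨hlt, hb, hex⟩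
    · exfalso
      obtain ⟨r, hr, hr1, hr2⟩ := hcr cur le_rfl (by omega)
      have := pvPass_cross iv cur false r hr hr1 hr2
      omega
    · simp only [hb, dite_eq_ite, if_true]
      apply ih
      · have := pv_filter_decrease cur _ hlt iv hex
        omega
      · intro x hx1 hx2
        exact hcr x (le_trans (pvPass_mono iv cur false) hx1) hx2

lemma pvLoop_upper (M iv : List (Int × Int))
    (hsep : List.Pairwise (fun m m' => m.2 < m'.1) M)
    (hcont : ∀ r ∈ iv, ∃ m' ∈ M, m'.1 ≤ r.1 ∧ r.2 ≤ m'.2)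
    (m : Int × Int) (hm : m ∈ M) (E' : Int) :
    ∀ (n : Nat) (cur : Int), (iv.filter (fun r => decide (cur < r.2))).length ≤ n →
    m.1 ≤ cur → cur ≤ m.2 → pvLoopB iv E' cur ≤ m.2 := by
  intro n
  induction n with
  | zero =>
    intro cur hlen h1 h2
    rw [pvLoopB]
    split_ifs with hE
    · exact h2
    rcases pvPass_inv iv cur false with ⟨heq, hb⟩ | ⟨hlt, hb, hex⟩
    · simp only [hb, Bool.false_eq_true, dite_eq_ite, if_false]
      exact (pvPass_upper M iv hsep hcont m hm cur false h1 h2).2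
    · exfalso
      have := pv_filter_decrease cur _ hlt iv hex
      omega
  | succ n ih =>
    intro cur hlen h1 h2
    rw [pvLoopB]
    split_ifs with hE
    · exact h2
    rcases pvPass_inv iv cur false with ⟨heq, hb⟩ | ⟨hlt, hb, hex⟩
    · simp only [hb, Bool.false_eq_true, dite_eq_ite, if_false]
      exact (pvPass_upper M iv hsep hcont m hm cur false h1 h2).2
    · simp only [hb, dite_eq_ite, if_true]
      obtain ⟨hu1, hu2⟩ := pvPass_upper M iv hsep hcont m hm cur false h1 h2
      apply ih _ _ hu1 hu2
      have := pv_filter_decrease cur _ hlt iv hex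
      omega

-- ===== VERDICT =====
theorem solution_spec : Claim_equal_solution := by
  intro A P B E hdom hpre
  unfold Spec_solution solution solution_alt
  obtain ⟨hA, hP⟩ := hpre
  set B' := if B > E then E else B with hB'
  set E' := if B > E then B else E with hE'
  have hBE : B' ≤ E' := by rw [hB', hE']; split_ifs <;> omega
  set iv := (List.zip A P).map (fun ij => (ij.2 - ij.1, ij.2 + ij.1)) with hiv
  have hivne : iv ≠ [] := by
    simp only [hiv, ne_eq, List.map_eq_nil_iff, List.zip_eq_nil_iff]
    tauto
  rcases hsrt : PySem.List.sorted iv (fun x => x.1) with _ | ⟨r0, rest⟩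
  · exact absurd ((PySem.List.sorted_eq_nil_iff iv (fun x => x.1) false).mp hsrt) hivne
  simp only [hsrt]
  have hmemsrt : ∀ r : Int × Int, r ∈ r0 :: rest ↔ r ∈ iv := by
    intro r; rw [← hsrt]; exact PySem.List.mem_sorted iv (fun x => x.1) false r
  have hpair : (r0 :: rest).Pairwise (fun a b => a.1 ≤ b.1) := by
    rw [← hsrt]; exact PySem.List.sorted_pairwise iv (fun x => x.1)
  obtain ⟨hhd, hpw'⟩ := List.pairwise_cons.mp hpair
  obtain ⟨g1, g2, g3, g4⟩ := pv_merge_master (r0 :: rest) rest [] r0 hpw' hhd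
    (fun r hr => List.mem_cons_of_mem _ hr) (by simp)
    (by
      intro m hm
      simp at hm
      rw [hm]
      exact ⟨fun x h1 h2 => ⟨r0, List.mem_cons_self, h1, h2⟩,
        fun h => ⟨r0, List.mem_cons_self, h, le_rfl⟩⟩)
  set st := rest.foldl pvMergeStep ([], r0) with hst
  have hcontain : ∀ r ∈ iv, ∃ m ∈ st.1 ++ [st.2], m.1 ≤ r.1 ∧ r.2 ≤ m.2 := by
    intro r hr
    rcases List.mem_cons.mp ((hmemsrt r).mpr hr) with rfl | hr'
    · exact g3 r ⟨r, by simp, le_rfl, le_rfl⟩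
    · exact g4 r hr'
  by_cases hany : iv.any (fun r => decide (r.1 ≤ B') && decide (B' ≤ r.2)) = true
  · rw [if_pos hany]
    rw [Bool.eq_iff_iff]
    simp only [List.any_eq_true, Bool.and_eq_true, decide_eq_true_eq]
    constructor
    · rintro ⟨m, hm, ⟨hm1, hm2⟩, hm3, hm4⟩
      apply pvLoop_lower iv E' (iv.filter (fun r => decide (B' < r.2))).length B' le_rfl
      intro x hx1 hx2
      obtain ⟨c1, c2⟩ := g2 m hm
      obtain ⟨r, hr, hr1, hr2⟩ := c1 x (by omega) (by omega)
      exact ⟨r, (hmemsrt r).mp hr, hr1, hr2⟩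
    · intro hloop
      obtain ⟨r, hr, hr1, hr2⟩ := by
        simpa only [List.any_eq_true, Bool.and_eq_true, decide_eq_true_eq] using hany
      obtain ⟨m, hm, hc1, hc2⟩ := hcontain r hr
      have hub := pvLoop_upper (st.1 ++ [st.2]) iv g1 hcontain m hm E'
        (iv.filter (fun r => decide (B' < r.2))).length B' le_rfl (by omega) (by omega)
      exact ⟨m, hm, ⟨by omega, by omega⟩, by omega, by omega⟩
  · rw [if_neg hany]
    have hany' : ∀ r ∈ iv, ¬(r.1 ≤ B' ∧ B' ≤ r.2) := by
      intro r hr hc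
      exact hany (List.any_eq_true.mpr ⟨r, hr, by simp [hc.1, hc.2]⟩)
    simp only [List.any_eq_false, Bool.and_eq_true, decide_eq_true_eq]
    intro m hm
    rintro ⟨⟨hm1, hm2⟩, hm3, hm4⟩
    obtain ⟨c1, c2⟩ := g2 m hm
    by_cases hlt : B' < m.2
    · obtain ⟨r, hr, hr1, hr2⟩ := c1 B' hm1 hlt
      exact hany' r ((hmemsrt r).mp hr) ⟨hr1, by omega⟩
    · obtain ⟨r, hr, hr1, hr2⟩ := c2 (by omega)
      exact hany' r ((hmemsrt r).mp hr) ⟨by omega, by omega⟩
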